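-- pv_equiv track=rewrite | github.com/Elisa-Correa/ayed1-2025-tps | TP4/ejercicio11.py | contar_subsecuencia
-- ===== SOURCE A (Python) =====
-- def contar_subsecuencia(cadena: str, sub_cadena: str) -> int:
--     """
--     Cuenta cuántas veces se encuentra una subcadena como subsecuencia dentro de otra cadena.
--     La búsqueda es insensible a mayúsculas/minúsculas, y los caracteres
--     de la subcadena no necesitan ser consecutivos, pero deben respetar el orden.
--
--     Pre:
--         - Recibe la cadena de caracteres principal (donde buscar).
--         - Recibe la sub-cadena (la subsecuencia a buscar).
--
--     Post:
--         - Retorna un entero con la cantidad total de veces que se encontró la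
--           subsecuencia de forma no solapada.
--     """
--
--     cadena_lower = cadena.lower()
--     sub_lower = sub_cadena.lower()
--     len_sub = len(sub_lower)
--
--     if len_sub == 0:
--         return 0
--
--     contador = 0
--     start_ind = 0
--
--     while start_ind < len(cadena_lower):
--
--         sub_ind = 0
--         coincidencia = -1
--
--         for i in range(start_ind, len(cadena_lower)):
--
--             if cadena_lower[i] == sub_lower[sub_ind]:
--
--                 sub_ind += 1
--
--                 if sub_ind == len_sub:
--                     contador += 1
--                     coincidencia = i
--                     break
--
--         if coincidencia != -1:
--             start_ind = coincidencia + 1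
--
--         else:
--             break
--
--     return contador
-- ===== SOURCE B (Python) =====
-- def contar_subsecuencia(cadena: str, sub_cadena: str) -> int:
--     cadena_lower = cadena.lower()
--     sub_lower = sub_cadena.lower()
--     len_sub = len(sub_lower)
--     if len_sub == 0:
--         return 0
--     contador = 0
--     sub_ind = 0
--     for ch in cadena_lower:
--         if ch == sub_lower[sub_ind]:
--             sub_ind += 1
--             if sub_ind == len_sub:
--                 contador += 1
--                 sub_ind = 0
--     return contador
-- ===== Notes on version B (the rewrite author's own statement) =====
-- stated objective: simpler
-- what changed: Replaced the nested restart loop (outer while over start_ind, inner for rescanning from start_ind) with a single pass over the string keeping one pointer into the subsequence that resets after each completed match.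
import Mathlib
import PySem

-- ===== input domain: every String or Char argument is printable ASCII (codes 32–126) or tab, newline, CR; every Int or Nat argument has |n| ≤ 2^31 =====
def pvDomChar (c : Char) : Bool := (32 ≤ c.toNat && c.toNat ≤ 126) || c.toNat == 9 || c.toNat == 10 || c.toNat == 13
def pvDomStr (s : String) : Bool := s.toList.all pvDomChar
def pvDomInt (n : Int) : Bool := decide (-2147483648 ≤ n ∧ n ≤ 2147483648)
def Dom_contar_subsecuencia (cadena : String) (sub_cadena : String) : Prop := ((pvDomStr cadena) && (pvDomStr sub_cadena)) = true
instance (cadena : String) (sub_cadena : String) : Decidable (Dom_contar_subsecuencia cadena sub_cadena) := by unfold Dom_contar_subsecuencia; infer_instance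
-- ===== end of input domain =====

-- B replaces A's nested restart loop with a single pass keeping one pointer into the
-- subsequence (objective: simpler).

-- ===== PORT A =====
-- inner 'for i in range(start_ind, len)' loop: returns coincidencia (-1 if no full match).
-- fuel = number of remaining indices (cl.length - i at every call), a structural measure only.
def pvInnerA (cl sl : List Char) : Nat → Nat → Nat → Int
  | 0, _, _ => -1
  | fuel + 1, i, sub_ind =>
    if _h : i < cl.length then
      if cl[i] == sl.getD sub_ind ' ' then
        if sub_ind + 1 == sl.length then (i : Int)
        else pvInnerA cl sl fuel (i + 1) (sub_ind + 1)
      else pvInnerA cl sl fuel (i + 1) sub_ind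
    else -1

-- outer 'while start_ind < len(cadena_lower)' loop; fuel bounds the iteration count
-- (start_ind strictly increases, so cl.length + 1 is always enough)
def pvOuterA (cl sl : List Char) : Nat → Nat → Int → Int
  | 0, _, contador => contador
  | fuel + 1, start_ind, contador =>
    if start_ind < cl.length then
      let coincidencia := pvInnerA cl sl (cl.length - start_ind) start_ind 0
      if coincidencia ≠ -1 then
        pvOuterA cl sl fuel (coincidencia.toNat + 1) (contador + 1)
      else contador
    else contador

def contar_subsecuencia (cadena : String) (sub_cadena : String) : Int :=
  let cadena_lower := PySem.Chars.lower cadena.toList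
  let sub_lower := PySem.Chars.lower sub_cadena.toList
  let len_sub := sub_lower.length
  if len_sub == 0 then 0
  else pvOuterA cadena_lower sub_lower (cadena_lower.length + 1) 0 0

-- ===== PORT B =====
-- single pass: one pointer sub_ind into sub_lower, reset on each completed match
def pvLoopB (sl : List Char) : List Char → Nat → Int → Int
  | [], _, contador => contador
  | ch :: rest, sub_ind, contador =>
    if ch == sl.getD sub_ind ' ' then
      if sub_ind + 1 == sl.length then pvLoopB sl rest 0 (contador + 1)
      else pvLoopB sl rest (sub_ind + 1) contador
    else pvLoopB sl rest sub_ind contador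

def contar_subsecuencia_alt (cadena : String) (sub_cadena : String) : Int :=
  let cadena_lower := PySem.Chars.lower cadena.toList
  let sub_lower := PySem.Chars.lower sub_cadena.toList
  let len_sub := sub_lower.length
  if len_sub == 0 then 0
  else pvLoopB sub_lower cadena_lower 0 0

-- ===== PRECONDITION & SPEC =====
def Spec_contar_subsecuencia (cadena : String) (sub_cadena : String) (out : Int) : Prop := out = contar_subsecuencia_alt cadena sub_cadena
instance (cadena : String) (sub_cadena : String) (out : Int) : Decidable (Spec_contar_subsecuencia cadena sub_cadena out) := by unfold Spec_contar_subsecuencia; infer_instance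

-- ===== CLAIM (what is proved, stated in full; the proofs are below) =====
def Claim_equal_contar_subsecuencia : Prop := ∀ (cadena : String) (sub_cadena : String), Dom_contar_subsecuencia cadena sub_cadena → Spec_contar_subsecuencia cadena sub_cadena (contar_subsecuencia cadena sub_cadena)

-- ===== LEMMAS AND PROOFS =====

-- one unfolding step of the outer loop, with the ≠-test turned into a plain if-=
theorem pvOuterA_succ (cl sl : List Char) (f start_ind : Nat) (contador : Int) :
    pvOuterA cl sl (f + 1) start_ind contador =
      if start_ind < cl.length then
        (if pvInnerA cl sl (cl.length - start_ind) start_ind 0 = -1 then contador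
         else pvOuterA cl sl f ((pvInnerA cl sl (cl.length - start_ind) start_ind 0).toNat + 1) (contador + 1))
      else contador := by
  by_cases h1 : start_ind < cl.length
  · by_cases h2 : pvInnerA cl sl (cl.length - start_ind) start_ind 0 = -1
    · simp [pvOuterA, h1, h2]
    · simp [pvOuterA, h1, h2]
  · simp [pvOuterA, h1]

-- with any fuel the outer loop at start ≥ length returns contador
theorem pvOuterA_done (cl sl : List Char) (f start_ind : Nat) (contador : Int)
    (h : ¬ start_ind < cl.length) : pvOuterA cl sl f start_ind contador = contador := by
  cases f with
  | zero => rfl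
  | succ f => simp [pvOuterA, h]

-- main invariant: A's "run the inner scan from i with pointer j, then keep restarting"
-- equals B's single pass over the suffix cl.drop i with the same pointer j
theorem pvKey (cl sl : List Char) (hs : sl ≠ []) : ∀ fo m i j c,
    cl.length - i < fo → cl.length - i ≤ m → j < sl.length →
    (if pvInnerA cl sl (cl.length - i) i j = -1 then c
     else pvOuterA cl sl (fo - 1) ((pvInnerA cl sl (cl.length - i) i j).toNat + 1) (c + 1))
      = pvLoopB sl (cl.drop i) j c := by
  intro fo
  induction fo with
  | zero => intro m i j c hfo; omega
  | succ fo ihO =>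
    intro m
    induction m with
    | zero =>
      intro i j c _ hm hj
      have hz : cl.length - i = 0 := by omega
      have hd : cl.drop i = [] := List.drop_eq_nil_of_le (by omega)
      rw [hz, hd]
      have h0 : pvInnerA cl sl 0 i j = -1 := rfl
      rw [pvLoopB, if_pos h0]
    | succ m ihI =>
      intro i j c hfo hm hj
      by_cases hi : i < cl.length
      · have hfi : cl.length - i = (cl.length - (i + 1)) + 1 := by omega
        rw [List.drop_eq_getElem_cons hi, pvLoopB, hfi]
        by_cases hc : cl[i] = sl[j]?.getD ' '
        · rw [if_pos (show (cl[i] == sl.getD j ' ') = true by simpa using hc)]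
          by_cases hd : j + 1 = sl.length
          · rw [if_pos (show (j + 1 == sl.length) = true by simpa using hd)]
            have hinner : pvInnerA cl sl ((cl.length - (i + 1)) + 1) i j = (i : Int) := by
              simp [pvInnerA, hi, hc, hd]
            rw [hinner, if_neg (by omega)]
            have hti : ((i : Int)).toNat = i := by omega
            rw [hti, Nat.add_sub_cancel]
            by_cases h2 : i + 1 < cl.length
            · obtain ⟨f, rfl⟩ : ∃ f, fo = f + 1 := ⟨fo - 1, by omega⟩
              rw [pvOuterA_succ, if_pos h2]
              have := ihO cl.length (i + 1) 0 (c + 1) (by omega) (by omega)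
                (List.length_pos_iff.mpr hs)
              simpa using this
            · have hdr : cl.drop (i + 1) = [] := List.drop_eq_nil_of_le (by omega)
              rw [pvOuterA_done cl sl fo (i + 1) (c + 1) h2, hdr, pvLoopB]
          · rw [if_neg (show ¬ ((j + 1 == sl.length) = true) by simpa using hd)]
            have hinner : pvInnerA cl sl ((cl.length - (i + 1)) + 1) i j
                = pvInnerA cl sl (cl.length - (i + 1)) (i + 1) (j + 1) := by
              simp [pvInnerA, hi, hc, hd]
            rw [hinner]
            exact ihI (i + 1) (j + 1) c (by omega) (by omega) (by omega)
        · rw [if_neg (show ¬ ((cl[i] == sl.getD j ' ') = true) by simpa using hc)]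
          have hinner : pvInnerA cl sl ((cl.length - (i + 1)) + 1) i j
              = pvInnerA cl sl (cl.length - (i + 1)) (i + 1) j := by
            simp [pvInnerA, hi, hc]
          rw [hinner]
          exact ihI (i + 1) j c (by omega) (by omega) hj
      · have hz : cl.length - i = 0 := by omega
        have hd : cl.drop i = [] := List.drop_eq_nil_of_le (by omega)
        rw [hz, hd]
        have h0 : pvInnerA cl sl 0 i j = -1 := rfl
        rw [pvLoopB, if_pos h0]

theorem pvAB (cl sl : List Char) (hs : sl ≠ []) :
    pvOuterA cl sl (cl.length + 1) 0 0 = pvLoopB sl cl 0 0 := by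
  have h := pvKey cl sl hs (cl.length + 1) cl.length 0 0 0 (by omega) (by omega)
    (List.length_pos_iff.mpr hs)
  rw [List.drop_zero, Nat.sub_zero, Nat.add_sub_cancel] at h
  rw [pvOuterA_succ]
  by_cases h0 : 0 < cl.length
  · rw [if_pos h0, Nat.sub_zero, ← h]
  · have hc : cl = [] := List.eq_nil_of_length_eq_zero (by omega)
    subst hc
    rw [if_neg h0, pvLoopB]

-- ===== VERDICT (by name: the statement is the Claim_ definition above) =====
theorem contar_subsecuencia_spec : Claim_equal_contar_subsecuencia := by
  intro cadena sub_cadena _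
  unfold Spec_contar_subsecuencia contar_subsecuencia contar_subsecuencia_alt
  by_cases hz : (PySem.Chars.lower sub_cadena.toList).length = 0
  · simp [hz]
  · have hb : ¬ (((PySem.Chars.lower sub_cadena.toList).length == 0) = true) := by
      simpa using hz
    simp only [if_neg hb]
    exact pvAB _ _ (fun h => hz (by simp [h]))
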